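-- pv_equiv track=rewrite | github.com/eytree/trace-scope | tools/cpp_ast_parser.py | _skip_to_endif
-- ===== SOURCE A (Python) =====
-- from typing import List, Dict, Optional, Tuple
--
-- def _skip_to_endif(lines: List[str], start_idx: int) -> int:
--     """Skip to matching #endif"""
--     depth = 1
--     i = start_idx + 1
--
--     while i < len(lines) and depth > 0:
--         line = lines[i].strip()
--         if line.startswith('#if'):
--             depth += 1
--         elif line.startswith('#endif'):
--             depth -= 1
--         i += 1
--
--     return i
-- ===== SOURCE B (Python) =====
-- def _skip_to_endif(lines, start_idx):
--     """Skip to matching #endif (recursive on nesting: each '#if...' line is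
--     skipped by a recursive call that returns the index just past its '#endif')."""
--     i = start_idx + 1
--     while i < len(lines):
--         s = lines[i].strip()
--         if s.startswith('#endif'):
--             return i + 1
--         if s.startswith('#if'):
--             i = _skip_to_endif(lines, i)
--         else:
--             i += 1
--     return i
-- ===== Notes on version B (the rewrite author's own statement) =====
-- stated objective: alternative
-- what changed: Replaces the explicit depth counter with recursion over the nesting structure: a nested '#if' block is skipped by a recursive call whose return value is the resume index, and the first '#endif' seen at the current level returns immediately.
import Mathlib
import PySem

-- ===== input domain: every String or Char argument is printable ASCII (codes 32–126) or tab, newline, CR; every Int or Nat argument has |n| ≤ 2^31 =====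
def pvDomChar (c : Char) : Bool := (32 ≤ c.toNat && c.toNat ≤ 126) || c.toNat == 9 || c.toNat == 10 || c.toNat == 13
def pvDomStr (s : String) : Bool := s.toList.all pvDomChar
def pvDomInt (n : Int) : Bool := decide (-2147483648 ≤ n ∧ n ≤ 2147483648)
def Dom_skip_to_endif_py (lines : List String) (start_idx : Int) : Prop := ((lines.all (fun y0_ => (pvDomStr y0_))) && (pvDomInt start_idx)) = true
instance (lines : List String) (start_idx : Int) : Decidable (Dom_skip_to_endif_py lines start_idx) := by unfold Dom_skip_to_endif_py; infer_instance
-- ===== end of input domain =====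

-- B replaces A's depth counter with recursion over the nesting structure (a recursive call skips each nested block); return values proved equal on Pre_ (A raises IndexError outside it).

-- ===== PORT A =====
-- A's while loop: state (i, depth); pyGetD "" stands for lines[i] (Pre_ keeps i in range whenever it is read)
def skipA_loop (lines : List String) (i depth : Int) : Int :=
  if _h : i < (lines.length : Int) ∧ 0 < depth then
    let line := PySem.Str.strip (PySem.List.pyGetD lines i "")
    let depth' := if PySem.Str.startswith line "#if" then depth + 1
                  else if PySem.Str.startswith line "#endif" then depth - 1
                  else depth
    skipA_loop lines (i + 1) depth'
  else i
termination_by ((lines.length : Int) - i).toNat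
decreasing_by omega

def skip_to_endif_py (lines : List String) (start_idx : Int) : Int :=
  skipA_loop lines (start_idx + 1) 1

-- ===== PORT B =====
-- Source B's loop from index i; the subtype carries i ≤ result, needed only for termination of the outer recursive call
def skipB_loop (lines : List String) (i : Int) : { r : Int // i ≤ r } :=
  if h : i < (lines.length : Int) then
    let s := PySem.Str.strip (PySem.List.pyGetD lines i "")
    if PySem.Str.startswith s "#endif" then ⟨i + 1, by omega⟩
    else if PySem.Str.startswith s "#if" then
      match skipB_loop lines (i + 1) with
      | ⟨j, hj⟩ =>
        match skipB_loop lines j with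
        | ⟨r, hr⟩ => ⟨r, by omega⟩
    else
      match skipB_loop lines (i + 1) with
      | ⟨r, hr⟩ => ⟨r, by omega⟩
  else ⟨i, le_refl i⟩
termination_by ((lines.length : Int) - i).toNat
decreasing_by all_goals omega

def skip_to_endif_py_alt (lines : List String) (start_idx : Int) : Int :=
  (skipB_loop lines (start_idx + 1)).1

-- ===== PRECONDITION & SPEC =====
-- Pre_ excludes exactly the inputs where A raises IndexError: start_idx + 1 below -len(lines) makes the first lines[i] out of range.
def Pre_skip_to_endif_py (lines : List String) (start_idx : Int) : Prop :=
  -(lines.length : Int) ≤ start_idx + 1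
instance (lines : List String) (start_idx : Int) : Decidable (Pre_skip_to_endif_py lines start_idx) := by unfold Pre_skip_to_endif_py; infer_instance
def pvWitness_skip_to_endif_py : List String × Int := (["#ifdef A", "x", "#endif"], 0)

def Spec_skip_to_endif_py (lines : List String) (start_idx : Int) (out : Int) : Prop := out = skip_to_endif_py_alt lines start_idx
instance (lines : List String) (start_idx : Int) (out : Int) : Decidable (Spec_skip_to_endif_py lines start_idx out) := by unfold Spec_skip_to_endif_py; infer_instance

-- ===== CLAIM (what is proved, stated in full; the proofs are below) =====
def Claim_equal_skip_to_endif_py : Prop := ∀ (lines : List String) (start_idx : Int), Dom_skip_to_endif_py lines start_idx → Pre_skip_to_endif_py lines start_idx → Spec_skip_to_endif_py lines start_idx (skip_to_endif_py lines start_idx)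

-- ===== LEMMAS AND PROOFS =====

-- branch equations for A's loop
lemma skipA_exit (lines : List String) (i depth : Int)
    (h : ¬ (i < (lines.length : Int) ∧ 0 < depth)) : skipA_loop lines i depth = i := by
  rw [skipA_loop]; simp [h]

lemma skipA_step (lines : List String) (i depth : Int) (hi : i < (lines.length : Int))
    (hd : 0 < depth) :
    skipA_loop lines i depth =
      skipA_loop lines (i + 1)
        (if PySem.Str.startswith (PySem.Str.strip (PySem.List.pyGetD lines i "")) "#if" then depth + 1
         else if PySem.Str.startswith (PySem.Str.strip (PySem.List.pyGetD lines i "")) "#endif" then depth - 1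
         else depth) := by
  conv_lhs => rw [skipA_loop]
  simp [hi, hd]

-- branch equations for B's loop
lemma skipB_exit (lines : List String) (i : Int) (hi : ¬ i < (lines.length : Int)) :
    (skipB_loop lines i).1 = i := by
  rw [skipB_loop]; simp [hi]

lemma skipB_endif (lines : List String) (i : Int) (hi : i < (lines.length : Int))
    (hend : PySem.Str.startswith (PySem.Str.strip (PySem.List.pyGetD lines i "")) "#endif") :
    (skipB_loop lines i).1 = i + 1 := by
  rw [skipB_loop]; simp only [hi, dif_pos, hend, if_pos]

lemma skipB_if (lines : List String) (i : Int) (hi : i < (lines.length : Int))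
    (hif : PySem.Str.startswith (PySem.Str.strip (PySem.List.pyGetD lines i "")) "#if")
    (hend : ¬ PySem.Str.startswith (PySem.Str.strip (PySem.List.pyGetD lines i "")) "#endif") :
    (skipB_loop lines i).1 = (skipB_loop lines (skipB_loop lines (i + 1)).1).1 := by
  rw [skipB_loop]; simp only [hi, dif_pos, hif, hend, if_pos, Bool.false_eq_true, if_false]

lemma skipB_other (lines : List String) (i : Int) (hi : i < (lines.length : Int))
    (hif : ¬ PySem.Str.startswith (PySem.Str.strip (PySem.List.pyGetD lines i "")) "#if")
    (hend : ¬ PySem.Str.startswith (PySem.Str.strip (PySem.List.pyGetD lines i "")) "#endif") :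
    (skipB_loop lines i).1 = (skipB_loop lines (i + 1)).1 := by
  rw [skipB_loop]; simp only [hi, dif_pos, hif, hend, Bool.false_eq_true, if_false]

-- a line cannot start with both "#if" and "#endif"
lemma not_both_prefix (s : String)
    (hif : PySem.Str.startswith s "#if" = true)
    (hend : PySem.Str.startswith s "#endif" = true) : False := by
  have h1 := (PySem.Chars.startswith_iff (s := s.toList) (p := "#if".toList)).mp
    (by simpa [PySem.Str.startswith] using hif)
  have h2 := (PySem.Chars.startswith_iff (s := s.toList) (p := "#endif".toList)).mp
    (by simpa [PySem.Str.startswith] using hend)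
  obtain ⟨t1, ht1⟩ := h1
  obtain ⟨t2, ht2⟩ := h2
  rw [← ht2] at ht1
  have : "#if".toList = ['#','i','f'] := by decide
  rw [this] at ht1
  have : "#endif".toList = ['#','e','n','d','i','f'] := by decide
  rw [this] at ht1
  simp at ht1

-- A's loop at depth d+1 first skips one block (= B's loop), then continues at depth d.
lemma skipA_eq_skipB (lines : List String) :
    ∀ (n : Nat) (i d : Int), ((lines.length : Int) - i).toNat = n → 0 ≤ d →
      skipA_loop lines i (d + 1) = skipA_loop lines (skipB_loop lines i).1 d := by
  intro n
  induction n using Nat.strong_induction_on with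
  | _ n ih =>
    intro i d hn hd
    by_cases hi : i < (lines.length : Int)
    · rw [skipA_step lines i (d + 1) hi (by omega)]
      by_cases hif : PySem.Str.startswith (PySem.Str.strip (PySem.List.pyGetD lines i "")) "#if"
      · have hend : ¬ PySem.Str.startswith (PySem.Str.strip (PySem.List.pyGetD lines i "")) "#endif" = true :=
          fun hend => not_both_prefix _ hif hend
        rw [if_pos hif, skipB_if lines i hi hif hend]
        have hj := (skipB_loop lines (i + 1)).2
        have step1 : skipA_loop lines (i + 1) (d + 1 + 1) =
            skipA_loop lines (skipB_loop lines (i + 1)).1 (d + 1) :=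
          ih (((lines.length : Int) - (i + 1)).toNat) (by omega) (i + 1) (d + 1) rfl (by omega)
        have step2 : skipA_loop lines (skipB_loop lines (i + 1)).1 (d + 1) =
            skipA_loop lines (skipB_loop lines (skipB_loop lines (i + 1)).1).1 d :=
          ih (((lines.length : Int) - (skipB_loop lines (i + 1)).1).toNat) (by omega)
            (skipB_loop lines (i + 1)).1 d rfl hd
        rw [step1, step2]
      · by_cases hend : PySem.Str.startswith (PySem.Str.strip (PySem.List.pyGetD lines i "")) "#endif"
        · rw [if_neg hif, if_pos hend, skipB_endif lines i hi hend]
          norm_num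
        · rw [if_neg hif, if_neg hend, skipB_other lines i hi hif hend]
          exact ih (((lines.length : Int) - (i + 1)).toNat) (by omega) (i + 1) d rfl hd
    · rw [skipB_exit lines i hi,
        skipA_exit lines i (d + 1) (by omega), skipA_exit lines i d (by omega)]

lemma skipA_zero (lines : List String) (i : Int) : skipA_loop lines i 0 = i :=
  skipA_exit lines i 0 (by omega)

-- ===== VERDICT (by name: the statement is the Claim_ definition above) =====
theorem skip_to_endif_py_spec : Claim_equal_skip_to_endif_py := by
  intro lines start_idx _hdom _hpre
  unfold Spec_skip_to_endif_py skip_to_endif_py skip_to_endif_py_alt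
  have h := skipA_eq_skipB lines (((lines.length : Int) - (start_idx + 1)).toNat)
    (start_idx + 1) 0 rfl le_rfl
  rw [show (0 : Int) + 1 = 1 from rfl] at h
  rw [h, skipA_zero]
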